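-- pv_equiv track=rewrite | github.com/SkadiTas/aoc2024 | daytwo/daytwo.py | deleteForSafety
-- ===== SOURCE A (Python) =====
-- def isSorted(report):
--     sortedDesc = sorted(report, reverse=True)
--     sortedAsc = sorted(report, reverse=False)
--     return report == sortedAsc or report == sortedDesc
--
-- def isSafe(report):
--     for i in range(len(report)-1):
--         if 1 <= abs(report[i] - report[i+1]) <= 3:
--             continue
--         else:
--             return False
--     return True
--
-- def deleteForSafety(report):
--     for i in range(len(report)):
--         checkReport = report.copy()
--         del checkReport[i]
--         if isSorted(checkReport) and isSafe(checkReport):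
--             return True
--         else:
--             continue
-- ===== SOURCE B (Python) =====
-- def deleteForSafety(report):
--     for i in range(len(report)):
--         trimmed = report[:i] + report[i+1:]
--         diffs = [b - a for a, b in zip(trimmed, trimmed[1:])]
--         if all(1 <= d <= 3 for d in diffs) or all(-3 <= d <= -1 for d in diffs):
--             return True
--     return None
-- ===== Notes on version B (the rewrite author's own statement) =====
-- stated objective: faster
-- what changed: Per deletion candidate, B replaces A's two full sorts plus a separate abs-difference scan by a single linear pass over the adjacent differences of the trimmed list (all in [1,3] or all in [-3,-1]).
import Mathlib
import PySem

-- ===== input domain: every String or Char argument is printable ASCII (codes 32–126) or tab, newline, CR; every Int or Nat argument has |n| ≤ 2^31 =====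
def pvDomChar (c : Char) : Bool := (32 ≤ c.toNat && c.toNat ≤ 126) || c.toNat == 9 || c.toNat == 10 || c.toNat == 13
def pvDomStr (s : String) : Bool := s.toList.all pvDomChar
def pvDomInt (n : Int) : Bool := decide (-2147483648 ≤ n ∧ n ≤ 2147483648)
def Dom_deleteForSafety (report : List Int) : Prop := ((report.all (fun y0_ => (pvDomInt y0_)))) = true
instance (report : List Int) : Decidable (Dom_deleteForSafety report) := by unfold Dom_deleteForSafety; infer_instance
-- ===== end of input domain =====

-- B replaces A's per-candidate double sort + separate abs-difference scan by one linear pass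
-- over the adjacent differences of the trimmed list (measurably faster); return values agree everywhere.

-- ===== PORT A =====

-- isSorted(report): report == sorted(report) or report == sorted(report, reverse=True)
def isSortedA (report : List Int) : Bool :=
  let sortedDesc := PySem.List.sorted report (fun x => x) true
  let sortedAsc := PySem.List.sorted report (fun x => x) false
  report == sortedAsc || report == sortedDesc

-- isSafe(report): every i of range(len-1) is in range, so pyGetD is exact there;
-- the loop's early `return False` over a pure per-index test is `all`.
def isSafeA (report : List Int) : Bool :=
  (PySem.List.pyRange 0 (PySem.List.len report - 1) 1).all (fun i =>
    decide (1 ≤ |PySem.List.pyGetD report i 0 - PySem.List.pyGetD report (i + 1) 0|) &&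
    decide (|PySem.List.pyGetD report i 0 - PySem.List.pyGetD report (i + 1) 0| ≤ 3))

-- the for-loop with early `return True`; falling off the end returns None.
-- i ∈ range(len(report)) is nonnegative and < len, so `del checkReport[i]` is eraseIdx i.toNat exactly.
def dfsLoopA (report : List Int) : List Int → Option Bool
  | [] => none
  | i :: rest =>
      let checkReport := report.eraseIdx i.toNat
      if isSortedA checkReport && isSafeA checkReport then some true
      else dfsLoopA report rest

def deleteForSafety (report : List Int) : Option Bool :=
  dfsLoopA report (PySem.List.pyRange 0 (PySem.List.len report) 1)

-- ===== PORT B =====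

-- diffs = [b - a for a, b in zip(trimmed, trimmed[1:])]
def diffsB (xs : List Int) : List Int := (xs.zip xs.tail).map (fun p => p.2 - p.1)

def goodB (xs : List Int) : Bool :=
  let ds := diffsB xs
  ds.all (fun d => decide (1 ≤ d) && decide (d ≤ 3)) ||
  ds.all (fun d => decide (-3 ≤ d) && decide (d ≤ -1))

-- report[:i] + report[i+1:] for 0 ≤ i ≤ len is take i ++ drop (i+1), exactly.
def dfsLoopB (report : List Int) : List Nat → Option Bool
  | [] => none
  | i :: rest =>
      let trimmed := report.take i ++ report.drop (i + 1)
      if goodB trimmed then some true else dfsLoopB report rest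

def deleteForSafety_alt (report : List Int) : Option Bool :=
  dfsLoopB report (List.range report.length)

-- ===== PRECONDITION & SPEC =====
def Spec_deleteForSafety (report : List Int) (out : Option Bool) : Prop := out = deleteForSafety_alt report
instance (report : List Int) (out : Option Bool) : Decidable (Spec_deleteForSafety report out) := by unfold Spec_deleteForSafety; infer_instance

-- ===== CLAIM (what is proved, stated in full; the proofs are below) =====
def Claim_equal_deleteForSafety : Prop := ∀ (report : List Int), Dom_deleteForSafety report → Spec_deleteForSafety report (deleteForSafety report)

-- ===== LEMMAS AND PROOFS =====

-- nondecreasing ↔ every adjacent difference is nonnegative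
theorem pairwise_asc_iff : ∀ xs : List Int,
    xs.Pairwise (fun a b => a ≤ b) ↔ (∀ p ∈ xs.zip xs.tail, 0 ≤ p.2 - p.1) := by
  intro xs
  induction xs with
  | nil => simp
  | cons a t ih =>
    rw [List.pairwise_cons]
    cases t with
    | nil => simp
    | cons b u =>
      show _ ↔ ∀ p ∈ (a, b) :: (b :: u).zip u, 0 ≤ p.2 - p.1
      constructor
      · rintro ⟨hhead, hp⟩ p hp'
        rcases List.mem_cons.mp hp' with h0 | h1
        · subst h0; have := hhead b (by simp); simp; omega
        · exact (ih.mp hp) p h1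
      · intro h
        have hab : a ≤ b := by have := h (a, b) (by simp); simpa using by omega
        have htail : (b :: u).Pairwise (fun a b => a ≤ b) :=
          ih.mpr (fun p hp => h p (List.mem_cons_of_mem _ hp))
        refine ⟨?_, htail⟩
        intro x hx
        rcases List.mem_cons.mp hx with h0 | h1
        · omega
        · have hb := (List.pairwise_cons.mp htail).1 x h1; omega

-- nonincreasing ↔ every adjacent difference is nonpositive
theorem pairwise_desc_iff : ∀ xs : List Int,
    xs.Pairwise (fun a b => b ≤ a) ↔ (∀ p ∈ xs.zip xs.tail, p.2 - p.1 ≤ 0) := by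
  intro xs
  induction xs with
  | nil => simp
  | cons a t ih =>
    rw [List.pairwise_cons]
    cases t with
    | nil => simp
    | cons b u =>
      show _ ↔ ∀ p ∈ (a, b) :: (b :: u).zip u, p.2 - p.1 ≤ 0
      constructor
      · rintro ⟨hhead, hp⟩ p hp'
        rcases List.mem_cons.mp hp' with h0 | h1
        · subst h0; have := hhead b (by simp); simp; omega
        · exact (ih.mp hp) p h1
      · intro h
        have hab : b ≤ a := by have := h (a, b) (by simp); simpa using by omega
        have htail : (b :: u).Pairwise (fun a b => b ≤ a) :=
          ih.mpr (fun p hp => h p (List.mem_cons_of_mem _ hp))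
        refine ⟨?_, htail⟩
        intro x hx
        rcases List.mem_cons.mp hx with h0 | h1
        · omega
        · have hb := (List.pairwise_cons.mp htail).1 x h1; omega

-- the index-driven adjacent scan equals the zip-with-tail scan
theorem adj_nat (g : Int → Int → Prop) : ∀ xs : List Int,
    (∀ k : Nat, k < xs.length - 1 → g (xs.getD k 0) (xs.getD (k + 1) 0)) ↔
      ∀ p ∈ xs.zip xs.tail, g p.1 p.2 := by
  intro xs
  induction xs with
  | nil => simp
  | cons a t ih =>
    cases t with
    | nil => simp
    | cons b u =>
      show _ ↔ ∀ p ∈ (a, b) :: (b :: u).zip u, g p.1 p.2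
      constructor
      · intro h p hp
        rcases List.mem_cons.mp hp with h0 | h1
        · subst h0
          have := h 0 (by simp [List.length_cons])
          simpa [List.getD] using this
        · refine (ih.mp ?_) p h1
          intro k hk
          have := h (k + 1) (by simp [List.length_cons] at hk ⊢; omega)
          simpa [List.getD_cons_succ] using this
      · intro h k hk
        cases k with
        | zero =>
          have := h (a, b) (by simp)
          simpa [List.getD] using this
        | succ k =>
          have := (ih.mpr (fun p hp => h p (List.mem_cons_of_mem _ hp))) k
            (by simp [List.length_cons] at hk ⊢; omega)
          simpa [List.getD_cons_succ] using this

-- A's isSafe is the band test |step| ∈ [1,3] on every adjacent pair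
theorem safe_iff (xs : List Int) :
    isSafeA xs = true ↔ ∀ p ∈ xs.zip xs.tail, 1 ≤ |p.2 - p.1| ∧ |p.2 - p.1| ≤ 3 := by
  unfold isSafeA
  rw [List.all_eq_true, ← adj_nat (fun a b => 1 ≤ |b - a| ∧ |b - a| ≤ 3) xs]
  constructor
  · intro h k hk
    have hmem : ((k : Nat) : Int) ∈ PySem.List.pyRange 0 (PySem.List.len xs - 1) 1 := by
      rw [PySem.List.mem_pyRange_one, PySem.List.len_eq]; omega
    have := h _ hmem
    rw [Bool.and_eq_true, decide_eq_true_eq, decide_eq_true_eq,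
      show (((k : Nat) : Int) + 1) = (((k + 1 : Nat) : Nat) : Int) by push_cast; ring,
      PySem.List.pyGetD_natCast, PySem.List.pyGetD_natCast] at this
    exact ⟨by rw [abs_sub_comm]; exact this.1, by rw [abs_sub_comm]; exact this.2⟩
  · intro h i hi
    rw [PySem.List.mem_pyRange_one, PySem.List.len_eq] at hi
    rw [Bool.and_eq_true, decide_eq_true_eq, decide_eq_true_eq,
      show i = ((i.toNat : Nat) : Int) by omega,
      show (((i.toNat : Nat) : Int) + 1) = (((i.toNat + 1 : Nat) : Nat) : Int) by push_cast; ring,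
      PySem.List.pyGetD_natCast, PySem.List.pyGetD_natCast]
    have := h i.toNat (by omega)
    exact ⟨by rw [abs_sub_comm]; exact this.1, by rw [abs_sub_comm]; exact this.2⟩

-- the combined "monotone and step-bounded" test equals B's directional band test
theorem check_eq (xs : List Int) : (isSortedA xs && isSafeA xs) = goodB xs := by
  rw [Bool.eq_iff_iff, Bool.and_eq_true]
  rw [safe_iff]
  unfold isSortedA goodB
  simp only [Bool.or_eq_true, beq_iff_eq, List.all_eq_true, Bool.and_eq_true, decide_eq_true_eq,
    diffsB, List.forall_mem_map]
  have hasc : xs = PySem.List.sorted xs (fun x => x) false ↔ ∀ p ∈ xs.zip xs.tail, 0 ≤ p.2 - p.1 := by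
    constructor
    · intro h
      rw [← pairwise_asc_iff]
      rw [h]
      exact PySem.List.sorted_pairwise xs (fun x => x)
    · intro h
      exact (PySem.List.sorted_eq_self_of_pairwise xs (fun x => x) ((pairwise_asc_iff xs).mpr h)).symm
  have hdesc : xs = PySem.List.sorted xs (fun x => x) true ↔ ∀ p ∈ xs.zip xs.tail, p.2 - p.1 ≤ 0 := by
    constructor
    · intro h
      rw [← pairwise_desc_iff]
      rw [h]
      exact PySem.List.sorted_pairwise_rev xs (fun x => x)
    · intro h
      exact (PySem.List.sorted_rev_eq_self_of_pairwise xs (fun x => x) ((pairwise_desc_iff xs).mpr h)).symm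
  rw [hasc, hdesc]
  constructor
  · rintro ⟨hmono | hmono, hsafe⟩
    · left; intro p hp
      have h1 := hmono p hp
      have h2 := (hsafe p hp).1
      have h3 := (hsafe p hp).2
      rw [abs_of_nonneg h1] at h2 h3
      exact ⟨h2, h3⟩
    · right; intro p hp
      have h1 := hmono p hp
      have h2 := (hsafe p hp).1
      have h3 := (hsafe p hp).2
      rw [abs_of_nonpos h1] at h2 h3
      constructor <;> omega
  · rintro (h | h)
    · refine ⟨Or.inl (fun p hp => by have := h p hp; omega), fun p hp => ?_⟩
      have := h p hp
      rw [abs_of_nonneg (by omega : (0:Int) ≤ p.2 - p.1)]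
      omega
    · refine ⟨Or.inr (fun p hp => by have := h p hp; omega), fun p hp => ?_⟩
      have := h p hp
      rw [abs_of_nonpos (by omega : p.2 - p.1 ≤ (0:Int))]
      omega

-- the two candidate loops agree step by step
theorem loops_eq (report : List Int) : ∀ l : List Nat,
    dfsLoopA report (l.map (fun (k : Nat) => (k : Int))) = dfsLoopB report l := by
  intro l
  induction l with
  | nil => rfl
  | cons k l ih =>
    rw [List.map_cons]
    show (if isSortedA (report.eraseIdx ((k : Int)).toNat) && isSafeA (report.eraseIdx ((k : Int)).toNat)
          then some true else dfsLoopA report (l.map (fun (k : Nat) => (k : Int)))) =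
         (if goodB (report.take k ++ report.drop (k + 1)) then some true else dfsLoopB report l)
    rw [show ((k : Int)).toNat = k from Int.toNat_natCast k, List.eraseIdx_eq_take_drop_succ,
      check_eq, ih]

theorem deleteForSafety_eq (report : List Int) :
    deleteForSafety report = deleteForSafety_alt report := by
  unfold deleteForSafety deleteForSafety_alt
  rw [PySem.List.pyRange_one,
    show ((PySem.List.len report - 0).toNat) = report.length by rw [PySem.List.len_eq]; omega,
    show (fun (k : Nat) => (0 : Int) + (k : Int)) = (fun (k : Nat) => (k : Int)) from funext (fun k => by omega),
    loops_eq]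

-- ===== VERDICT (by name: the statement is the Claim_ definition above) =====
theorem deleteForSafety_spec : Claim_equal_deleteForSafety := by
  intro report _
  unfold Spec_deleteForSafety
  exact deleteForSafety_eq report
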